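-- pv_equiv track=rewrite | github.com/RODZAKI/rodzaki-quasantum | tools/analyze_drawers.py | co_occurrence_matrix
-- ===== SOURCE A (Python) =====
-- DRAWERS = [
--     "dharma", "logos", "maat",
--     "dao", "rta", "ayni",
--     "ubuntu", "mitakuye-oyasin", "sumak-kawsay"
-- ]
--
-- def co_occurrence_matrix(artifacts):
--     matrix = {d: {d2: 0 for d2 in DRAWERS} for d in DRAWERS}
--     for a in artifacts:
--         dominant = a.get("drawers", [])
--         for i, d1 in enumerate(dominant):
--             for d2 in dominant:
--                 if d1 != d2 and d1 in matrix and d2 in matrix[d1]: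
--                     matrix[d1][d2] += 1
--     return matrix
-- ===== SOURCE B (Python) =====
-- DRAWERS = [
--     "dharma", "logos", "maat",
--     "dao", "rta", "ayni",
--     "ubuntu", "mitakuye-oyasin", "sumak-kawsay"
-- ]
--
-- def co_occurrence_matrix(artifacts):
--     drawer_lists = [a.get("drawers", []) for a in artifacts]
--     return {d1: {d2: 0 if d1 == d2 else
--                  sum(ds.count(d1) * ds.count(d2) for ds in drawer_lists)
--                  for d2 in DRAWERS}
--             for d1 in DRAWERS}
-- ===== Notes on version B (the rewrite author's own statement) =====
-- stated objective: alternative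
-- what changed: B builds the result functionally with no mutable matrix at all: it extracts each artifact's drawer list once, then for every ordered pair of distinct DRAWERS computes the cell directly as sum over artifacts of count(d1)*count(d2), instead of A's per-artifact double loop of guarded dict increments.
import Mathlib
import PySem

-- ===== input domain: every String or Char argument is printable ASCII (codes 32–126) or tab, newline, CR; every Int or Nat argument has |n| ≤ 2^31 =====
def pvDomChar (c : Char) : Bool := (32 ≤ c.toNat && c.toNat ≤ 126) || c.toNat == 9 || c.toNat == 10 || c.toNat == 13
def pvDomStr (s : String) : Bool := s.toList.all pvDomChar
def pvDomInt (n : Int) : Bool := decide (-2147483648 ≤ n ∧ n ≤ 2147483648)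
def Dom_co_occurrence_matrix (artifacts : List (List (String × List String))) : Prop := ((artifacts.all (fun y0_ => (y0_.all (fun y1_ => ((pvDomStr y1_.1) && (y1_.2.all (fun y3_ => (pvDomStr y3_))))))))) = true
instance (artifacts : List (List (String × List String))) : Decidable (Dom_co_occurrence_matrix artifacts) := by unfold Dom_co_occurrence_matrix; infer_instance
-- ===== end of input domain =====

-- B replaces A's mutable matrix of guarded dict increments by a purely functional
-- construction: each cell (d1,d2) of the fixed 9x9 result is computed directly as the
-- sum over artifacts of count(d1)*count(d2) (objective: alternative algorithm).

-- the module-level DRAWERS constant, shared by both Python sources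
def pvDrawers : List String :=
  ["dharma", "logos", "maat", "dao", "rta", "ayni", "ubuntu", "mitakuye-oyasin", "sumak-kawsay"]

-- ===== PORT A =====
-- matrix = {d: {d2: 0 for d2 in DRAWERS} for d in DRAWERS}
def pvInitMatrix : PySem.Dict String (PySem.Dict String Int) :=
  pvDrawers.foldl
    (fun m d => m.insert d (pvDrawers.foldl (fun r d2 => r.insert d2 (0 : Int)) PySem.Dict.empty))
    PySem.Dict.empty

-- 'd2 in matrix[d1]' is evaluated only under 'd1 in matrix' (Python short-circuit `and`);
-- the total '(m.getD d1 ∅).contains d2' returns false there too, so the Bool is value-equal.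
def co_occurrence_matrix (artifacts : List (List (String × List String))) : List (String × List (String × Int)) :=
  let matrix := artifacts.foldl
    (fun m a =>
      let dominant := (PySem.Dict.mk a).getD "drawers" []
      (PySem.List.enumerate dominant).foldl
        (fun m p =>
          dominant.foldl
            (fun m d2 =>
              if p.2 != d2 && m.contains p.2 && (m.getD p.2 PySem.Dict.empty).contains d2 then
                m.modify p.2 PySem.Dict.empty (fun row => row.modify d2 0 (· + 1))
              else m)
            m)
        m)
    pvInitMatrix
  matrix.items.map (fun p => (p.1, p.2.items))

-- ===== PORT B =====
-- drawer_lists = [a.get("drawers", []) for a in artifacts]; then a pure dict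
-- comprehension over the distinct DRAWERS keys building each cell by a closed sum.
def co_occurrence_matrix_alt (artifacts : List (List (String × List String))) : List (String × List (String × Int)) :=
  let drawer_lists := artifacts.map (fun a => (PySem.Dict.mk a).getD "drawers" [])
  pvDrawers.map (fun d1 =>
    (d1, pvDrawers.map (fun d2 =>
      (d2, if d1 == d2 then (0 : Int)
           else drawer_lists.foldl
             (fun s ds => s + (PySem.List.count ds d1 : Int) * (PySem.List.count ds d2 : Int)) 0))))

-- ===== PRECONDITION & SPEC =====
def Spec_co_occurrence_matrix (artifacts : List (List (String × List String))) (out : List (String × List (String × Int))) : Prop := out = co_occurrence_matrix_alt artifacts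
instance (artifacts : List (List (String × List String))) (out : List (String × List (String × Int))) : Decidable (Spec_co_occurrence_matrix artifacts out) := by unfold Spec_co_occurrence_matrix; infer_instance

-- ===== CLAIM (what is proved, stated in full; the proofs are below) =====
def Claim_equal_co_occurrence_matrix : Prop := ∀ (artifacts : List (List (String × List String))), Dom_co_occurrence_matrix artifacts → Spec_co_occurrence_matrix artifacts (co_occurrence_matrix artifacts)

-- ===== LEMMAS AND PROOFS =====

-- the value of cell (x, y) of a matrix
def pvVal (m : PySem.Dict String (PySem.Dict String Int)) (x y : String) : Int :=
  (m.getD x PySem.Dict.empty).getD y 0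

-- invariant: the key structure of the matrix never changes
def pvGood (m : PySem.Dict String (PySem.Dict String Int)) : Prop :=
  m.keys = pvDrawers ∧ ∀ d ∈ pvDrawers, (m.getD d PySem.Dict.empty).keys = pvDrawers

theorem pvDrawers_nodup : pvDrawers.Nodup := by decide

theorem pvGood_init : pvGood pvInitMatrix := by
  constructor
  · decide
  · decide

theorem pvContains_of_good {m} (h : pvGood m) (d : String) :
    m.contains d = decide (d ∈ pvDrawers) := by
  rw [PySem.Dict.contains_eq_decide_mem_keys, h.1]

theorem pvRowContains_of_good {m} (h : pvGood m) (d d2 : String) :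
    (m.getD d PySem.Dict.empty).contains d2 = decide (d ∈ pvDrawers ∧ d2 ∈ pvDrawers) := by
  by_cases hd : d ∈ pvDrawers
  · rw [PySem.Dict.contains_eq_decide_mem_keys, h.2 d hd]; simp [hd]
  · rw [PySem.Dict.getD_of_not_contains]
    · simp [hd]
    · rw [pvContains_of_good h]; simp [hd]

theorem pvGood_modify {m} (h : pvGood m) {d1 d2 : String}
    (h1 : d1 ∈ pvDrawers) (h2 : d2 ∈ pvDrawers) (g : Int → Int) :
    pvGood (m.modify d1 PySem.Dict.empty (fun row => row.modify d2 0 g)) := by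
  have hc1 : m.contains d1 = true := by rw [pvContains_of_good h]; simp [h1]
  constructor
  · rw [PySem.Dict.keys_modify, PySem.Dict.keys_insert_of_contains _ _ hc1, h.1]
  · intro d hd
    rw [PySem.Dict.getD_modify]
    by_cases hdd : d = d1
    · simp only [hdd, if_true]
      have hr := h.2 d1 h1
      have hc2 : (m.getD d1 PySem.Dict.empty).contains d2 = true := by
        rw [PySem.Dict.contains_eq_decide_mem_keys, hr]; simp [h2]
      rw [PySem.Dict.keys_modify, PySem.Dict.keys_insert_of_contains _ _ hc2, hr]
    · rw [if_neg hdd]; exact h.2 d hd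

theorem pvVal_modify (m : PySem.Dict String (PySem.Dict String Int)) (d1 d2 : String)
    (g : Int → Int) (x y : String) :
    pvVal (m.modify d1 PySem.Dict.empty (fun row => row.modify d2 0 g)) x y =
      if x = d1 ∧ y = d2 then g (pvVal m d1 d2) else pvVal m x y := by
  unfold pvVal
  rw [PySem.Dict.getD_modify]
  by_cases hx : x = d1
  · subst hx
    rw [if_pos rfl, PySem.Dict.getD_modify]
    by_cases hy : y = d2
    · subst hy; simp
    · simp [hy]
  · simp [hx]

-- every cell of the initial matrix is 0
theorem pvVal_init (x y : String) : pvVal pvInitMatrix x y = 0 := by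
  have row0 : ∀ (l : List String) (r : PySem.Dict String Int), r.getD y 0 = 0 →
      (l.foldl (fun r d2 => r.insert d2 (0 : Int)) r).getD y 0 = 0 := by
    intro l
    induction l with
    | nil => intro r h; exact h
    | cons d t ih =>
      intro r h
      simp only [List.foldl_cons]
      apply ih
      rw [PySem.Dict.getD_insert]
      split_ifs <;> simp [h]
  have empty0 : (PySem.Dict.empty : PySem.Dict String Int).getD y 0 = 0 := by
    apply PySem.Dict.getD_of_not_contains
    rfl
  have top : ∀ (l : List String) (m : PySem.Dict String (PySem.Dict String Int)),
      (m.getD x PySem.Dict.empty).getD y 0 = 0 →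
      ((l.foldl (fun m d => m.insert d
          (pvDrawers.foldl (fun r d2 => r.insert d2 (0 : Int)) PySem.Dict.empty)) m).getD
          x PySem.Dict.empty).getD y 0 = 0 := by
    intro l
    induction l with
    | nil => intro m h; exact h
    | cons d t ih =>
      intro m h
      simp only [List.foldl_cons]
      apply ih
      rw [PySem.Dict.getD_insert]
      split_ifs with hx
      · exact row0 pvDrawers PySem.Dict.empty empty0
      · exact h
  unfold pvVal pvInitMatrix
  apply top
  rw [PySem.Dict.getD_of_not_contains _ _ (by rfl)]

-- a fold over enumerate(l) that ignores the index is a fold over l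
theorem pvFoldl_enumerate_snd {α β : Type} (l : List α) (g : β → α → β) (m : β) (s : Int) :
    (PySem.List.enumerate l s).foldl (fun acc p => g acc p.2) m = l.foldl g m := by
  induction l generalizing m s with
  | nil => simp [PySem.List.enumerate]
  | cons a t ih => simp [PySem.List.enumerate, ih]

-- A's inner loop over d2 for a fixed d1
theorem pvInnerA (L : List String) (d1 : String) {m} (h : pvGood m) :
    pvGood (L.foldl
      (fun m d2 =>
        if d1 != d2 && m.contains d1 && (m.getD d1 PySem.Dict.empty).contains d2 then
          m.modify d1 PySem.Dict.empty (fun row => row.modify d2 0 (· + 1))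
        else m) m) ∧
    ∀ x y, pvVal (L.foldl
      (fun m d2 =>
        if d1 != d2 && m.contains d1 && (m.getD d1 PySem.Dict.empty).contains d2 then
          m.modify d1 PySem.Dict.empty (fun row => row.modify d2 0 (· + 1))
        else m) m) x y =
      pvVal m x y +
        (if x = d1 ∧ d1 ∈ pvDrawers ∧ y ∈ pvDrawers ∧ y ≠ d1 then (L.count y : Int) else 0) := by
  induction L generalizing m with
  | nil => exact ⟨h, by intro x y; simp⟩
  | cons d2 t ih =>
    simp only [List.foldl_cons]
    rw [pvContains_of_good h, pvRowContains_of_good h]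
    by_cases hc : d2 ≠ d1 ∧ d1 ∈ pvDrawers ∧ d2 ∈ pvDrawers
    · have hguard : (d1 != d2 && decide (d1 ∈ pvDrawers) &&
          decide (d1 ∈ pvDrawers ∧ d2 ∈ pvDrawers)) = true := by
        simp [hc.1.symm, hc.2.1, hc.2.2]
      rw [if_pos hguard]
      have h' := pvGood_modify h hc.2.1 hc.2.2 (· + 1)
      obtain ⟨g1, g2⟩ := ih h'
      refine ⟨g1, ?_⟩
      intro x y
      rw [g2, pvVal_modify]
      by_cases hx : x = d1
      · subst hx
        by_cases hy : y = d2
        · subst hy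
          simp [hc.1, hc.2.1, hc.2.2]
          ring
        · simp only [hy, and_false, if_false]
          have : (d2 :: t).count y = t.count y := by
            simp [Ne.symm hy]
          rw [this]
      · simp [hx]
    · have hguard : (d1 != d2 && decide (d1 ∈ pvDrawers) &&
          decide (d1 ∈ pvDrawers ∧ d2 ∈ pvDrawers)) = false := by
        by_cases e : d1 = d2
        · simp [e]
        · simp only [not_and_or, not_not] at hc
          rcases hc with h1 | h2 | h3
          · exact absurd h1.symm e
          · simp [h2]
          · simp [h3]
      simp only [hguard, Bool.false_eq_true, if_false]
      obtain ⟨g1, g2⟩ := ih h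
      refine ⟨g1, ?_⟩
      intro x y
      rw [g2]
      congr 1
      by_cases hP : x = d1 ∧ d1 ∈ pvDrawers ∧ y ∈ pvDrawers ∧ y ≠ d1
      · have hy : y ≠ d2 := by
          rintro rfl
          exact hc ⟨hP.2.2.2, hP.2.1, hP.2.2.1⟩
        simp [hP, Ne.symm hy]
      · simp [hP]

-- A's per-artifact double loop: l ranges over the outer enumeration values, L is the full list
theorem pvLoopA (L l : List String) {m} (h : pvGood m) :
    pvGood (l.foldl
      (fun m d1 =>
        L.foldl
          (fun m d2 =>
            if d1 != d2 && m.contains d1 && (m.getD d1 PySem.Dict.empty).contains d2 then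
              m.modify d1 PySem.Dict.empty (fun row => row.modify d2 0 (· + 1))
            else m) m) m) ∧
    ∀ x y, pvVal (l.foldl
      (fun m d1 =>
        L.foldl
          (fun m d2 =>
            if d1 != d2 && m.contains d1 && (m.getD d1 PySem.Dict.empty).contains d2 then
              m.modify d1 PySem.Dict.empty (fun row => row.modify d2 0 (· + 1))
            else m) m) m) x y =
      pvVal m x y +
        (if x ∈ pvDrawers ∧ y ∈ pvDrawers ∧ y ≠ x then (l.count x : Int) * (L.count y : Int) else 0) := by
  induction l generalizing m with
  | nil => exact ⟨h, by intro x y; simp⟩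
  | cons d1 t ih =>
    simp only [List.foldl_cons]
    obtain ⟨g1, g2⟩ := pvInnerA L d1 h
    obtain ⟨G1, G2⟩ := ih g1
    refine ⟨G1, ?_⟩
    intro x y
    rw [G2, g2]
    by_cases hx : x = d1
    · subst hx
      by_cases hP : x ∈ pvDrawers ∧ y ∈ pvDrawers ∧ y ≠ x
      · simp only [hP, true_and, List.count_cons, if_pos, BEq.rfl]
        push_cast
        split_ifs <;> ring
      · simp [hP]
    · have hcnt : (d1 :: t).count x = t.count x := by simp [Ne.symm hx]
      simp [hx, hcnt]

-- the whole artifact loop of A: good, and each cell is the per-artifact sum of products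
theorem pvFoldA (artifacts : List (List (String × List String))) {m} (h : pvGood m) :
    pvGood (artifacts.foldl
      (fun m a =>
        let dominant := (PySem.Dict.mk a).getD "drawers" []
        (PySem.List.enumerate dominant).foldl
          (fun m p =>
            dominant.foldl
              (fun m d2 =>
                if p.2 != d2 && m.contains p.2 && (m.getD p.2 PySem.Dict.empty).contains d2 then
                  m.modify p.2 PySem.Dict.empty (fun row => row.modify d2 0 (· + 1))
                else m) m) m) m) ∧
    ∀ x y, pvVal (artifacts.foldl
      (fun m a =>
        let dominant := (PySem.Dict.mk a).getD "drawers" []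
        (PySem.List.enumerate dominant).foldl
          (fun m p =>
            dominant.foldl
              (fun m d2 =>
                if p.2 != d2 && m.contains p.2 && (m.getD p.2 PySem.Dict.empty).contains d2 then
                  m.modify p.2 PySem.Dict.empty (fun row => row.modify d2 0 (· + 1))
                else m) m) m) m) x y =
      pvVal m x y +
        (if x ∈ pvDrawers ∧ y ∈ pvDrawers ∧ y ≠ x then
          (artifacts.map (fun a =>
            let L := (PySem.Dict.mk a).getD "drawers" []
            (L.count x : Int) * (L.count y : Int))).sum
         else 0) := by
  induction artifacts generalizing m with
  | nil => exact ⟨h, by intro x y; simp⟩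
  | cons a t ih =>
    simp only [List.foldl_cons]
    rw [pvFoldl_enumerate_snd ((PySem.Dict.mk a).getD "drawers" [])
      (fun m d1 =>
        ((PySem.Dict.mk a).getD "drawers" []).foldl
          (fun m d2 =>
            if d1 != d2 && m.contains d1 && (m.getD d1 PySem.Dict.empty).contains d2 then
              m.modify d1 PySem.Dict.empty (fun row => row.modify d2 0 (· + 1))
            else m) m) m 0]
    obtain ⟨g1, g2⟩ :=
      pvLoopA ((PySem.Dict.mk a).getD "drawers" []) ((PySem.Dict.mk a).getD "drawers" []) h
    obtain ⟨G1, G2⟩ := ih g1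
    refine ⟨G1, ?_⟩
    intro x y
    rw [G2, g2]
    simp only [List.map_cons, List.sum_cons]
    split_ifs with hP
    · ring
    · ring

-- ===== VERDICT (by name: the statement is the Claim_ definition above) =====
theorem co_occurrence_matrix_spec : Claim_equal_co_occurrence_matrix := by
  intro artifacts _
  unfold Spec_co_occurrence_matrix co_occurrence_matrix co_occurrence_matrix_alt
  obtain ⟨hg, hv⟩ := pvFoldA artifacts pvGood_init
  generalize hM : (artifacts.foldl _ pvInitMatrix) = M at hg hv
  dsimp only
  rw [PySem.Dict.items_eq_map_keys M (by rw [hg.1]; exact pvDrawers_nodup) PySem.Dict.empty,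
      hg.1, List.map_map]
  apply List.map_congr_left
  intro x hx
  simp only [Function.comp_apply]
  refine congrArg (Prod.mk x) ?_
  rw [PySem.Dict.items_eq_map_keys (M.getD x PySem.Dict.empty)
      (by rw [hg.2 x hx]; exact pvDrawers_nodup) (0 : Int), hg.2 x hx]
  apply List.map_congr_left
  intro y hy
  refine congrArg (Prod.mk y) ?_
  have := hv x y
  rw [pvVal_init, zero_add] at this
  show pvVal M x y = _
  rw [this]
  by_cases hxy : x = y
  · simp [hxy]
  · have hbeq : (x == y) = false := by simp [hxy]
    simp only [hx, hy, Ne.symm hxy, ne_eq, not_false_eq_true, and_self, if_true, hbeq,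
      Bool.false_eq_true, if_false]
    rw [PySem.List.foldl_add, zero_add, List.map_map]
    simp [Function.comp_def, PySem.List.count_eq]
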